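-- pv_equiv track=rewrite | github.com/duskygloom/networking | flag_based_framing/main.py | rx
-- ===== SOURCE A (Python) =====
-- flag    = "011110"
--
-- def rx(rxstream: str) -> str:
--     '''
--         Takes modified stream as argument.
--         Returns original stream.
--     '''
--     buffer = ""
--     txstream = ""
--     for i in range(len(rxstream)):
--         bit = rxstream[i]
--         if (buffer == "0111" and bit == "0"):
--             buffer = buffer[1:] + bit
--         elif (buffer == "0111"):
--             return txstream[:-4]
--         elif len(buffer) < len(flag)-2:
--             buffer += bit
--             txstream += bit
--         else:
--             buffer = buffer[1:] + bit
--             txstream += bit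
--     return txstream
-- ===== SOURCE B (Python) =====
-- def rx(rxstream: str) -> str:
--     n = len(rxstream)
--     # locate the end-of-frame flag: first i with preceding window "0111" and a non-"0" bit
--     p = next((i for i in range(4, n)
--               if rxstream[i-4:i] == "0111" and rxstream[i] != "0"), None)
--     end = n if p is None else p
--     # remove stuffed zeros in one comprehension pass over the frame body
--     out = [rxstream[i] for i in range(end)
--            if not (i >= 4 and rxstream[i-4:i] == "0111" and rxstream[i] == "0")]
--     res = "".join(out)
--     return res[:-4] if p is not None else res
-- ===== Notes on version B (the rewrite author's own statement) =====
-- stated objective: alternative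
-- what changed: A's single stateful loop with a 4-char sliding buffer and an in-loop early return is replaced by a two-pass decomposition: first locate the flag end with a window scan, then strip stuffed zeros with one slicing comprehension, then chop the trailing flag prefix.
import Mathlib
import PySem

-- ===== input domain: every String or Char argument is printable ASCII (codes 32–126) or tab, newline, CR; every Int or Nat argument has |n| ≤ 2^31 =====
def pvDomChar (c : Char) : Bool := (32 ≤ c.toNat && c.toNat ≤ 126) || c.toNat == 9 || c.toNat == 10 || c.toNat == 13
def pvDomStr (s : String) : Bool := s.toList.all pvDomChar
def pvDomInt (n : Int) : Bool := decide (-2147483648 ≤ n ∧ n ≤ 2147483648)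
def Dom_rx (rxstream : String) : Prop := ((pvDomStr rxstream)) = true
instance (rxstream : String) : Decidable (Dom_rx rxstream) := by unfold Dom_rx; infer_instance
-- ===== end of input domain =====

-- B replaces A's single stateful sliding-buffer loop by a two-pass decomposition
-- (locate the flag end first, then remove stuffed zeros by window slicing); objective: alternative.

-- ===== PORT A =====
-- Literal transliteration of A's for-loop: buffer[1:]+bit = buffer.drop 1 ++ [bit],
-- txstream[:-4] = take (length - 4) (exact: Python's [:-4] on a string shorter than 4 is "",
-- and Nat subtraction gives take 0 = [] there).
def rxLoop (cs buffer tx : List Char) : List Char :=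
  match cs with
  | [] => tx
  | bit :: rest =>
    if buffer = ['0', '1', '1', '1'] ∧ bit = '0' then
      rxLoop rest (buffer.drop 1 ++ [bit]) tx
    else if buffer = ['0', '1', '1', '1'] then
      tx.take (tx.length - 4)
    else if buffer.length < 4 then
      rxLoop rest (buffer ++ [bit]) (tx ++ [bit])
    else
      rxLoop rest (buffer.drop 1 ++ [bit]) (tx ++ [bit])

def rx (rxstream : String) : String := String.mk (rxLoop rxstream.toList [] [])

-- ===== PORT B =====
-- rxstream[i-4:i] == "0111" and rxstream[i] != "0" (i is always in range in Source B, so getD is exact)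
def rxFindP (cs : List Char) (i : Nat) : Bool :=
  ((cs.drop (i - 4)).take 4 == ['0', '1', '1', '1']) && (cs.getD i ' ' != '0')

-- i >= 4 and rxstream[i-4:i] == "0111" and rxstream[i] == "0"
def rxDropP (cs : List Char) (i : Nat) : Bool :=
  (4 ≤ i) && ((cs.drop (i - 4)).take 4 == ['0', '1', '1', '1']) && (cs.getD i ' ' == '0')

def rx_alt (rxstream : String) : String :=
  let cs := rxstream.toList
  let n := cs.length
  let p? := (List.range' 4 (n - 4)).find? (rxFindP cs)   -- next(... for i in range(4, n) ...)
  let e := match p? with | none => n | some p => p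
  let out := ((List.range e).filter (fun i => !rxDropP cs i)).map (fun i => cs.getD i ' ')
  match p? with
  | none => String.mk out
  | some _ => String.mk (out.take (out.length - 4))      -- res[:-4]

-- ===== PRECONDITION & SPEC =====
def Spec_rx (rxstream : String) (out : String) : Prop := out = rx_alt rxstream
instance (rxstream : String) (out : String) : Decidable (Spec_rx rxstream out) := by unfold Spec_rx; infer_instance

-- ===== CLAIM (what is proved, stated in full; the proofs are below) =====
def Claim_equal_rx : Prop := ∀ (rxstream : String), Dom_rx rxstream → Spec_rx rxstream (rx rxstream)

-- ===== LEMMAS AND PROOFS =====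

-- What A's loop computes from position i on, phrased in B's two-pass vocabulary.
def rhs (cs : List Char) (i : Nat) (tx : List Char) : List Char :=
  match (List.range' i (cs.length - i)).find? (fun j => (4 ≤ j) && rxFindP cs j) with
  | some p =>
      let t := tx ++ ((List.range' i (p - i)).filter (fun j => !rxDropP cs j)).map (fun j => cs.getD j ' ')
      t.take (t.length - 4)
  | none => tx ++ ((List.range' i (cs.length - i)).filter (fun j => !rxDropP cs j)).map (fun j => cs.getD j ' ')

lemma range'_cons (i n : Nat) (h : i < n) :
    List.range' i (n - i) = i :: List.range' (i + 1) (n - (i + 1)) := by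
  have h1 : n - i = (n - (i + 1)) + 1 := by omega
  rw [h1, List.range'_succ]

lemma rhs_stop (cs : List Char) (i : Nat) (tx : List Char) (hi : i < cs.length)
    (hc : ((4 ≤ i) && rxFindP cs i) = true) :
    rhs cs i tx = tx.take (tx.length - 4) := by
  unfold rhs
  rw [range'_cons i cs.length hi]
  simp [List.find?_cons, hc]

lemma rhs_skip (cs : List Char) (i : Nat) (tx : List Char) (hi : i < cs.length)
    (hc : ((4 ≤ i) && rxFindP cs i) = false) (hd : rxDropP cs i = true) :
    rhs cs i tx = rhs cs (i + 1) tx := by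
  unfold rhs
  rw [range'_cons i cs.length hi]
  simp only [List.find?_cons, hc]
  cases hf : (List.range' (i + 1) (cs.length - (i + 1))).find? (fun j => (4 ≤ j) && rxFindP cs j) with
  | none =>
    simp [List.filter_cons, hd]
  | some p =>
    have hp : i + 1 ≤ p := by
      have := List.mem_range'_1.mp (List.mem_of_find?_eq_some hf)
      omega
    simp only []
    rw [range'_cons i p (by omega)]
    simp [List.filter_cons, hd]

lemma rhs_keep (cs : List Char) (i : Nat) (tx : List Char) (hi : i < cs.length)
    (hc : ((4 ≤ i) && rxFindP cs i) = false) (hd : rxDropP cs i = false) :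
    rhs cs i tx = rhs cs (i + 1) (tx ++ [cs.getD i ' ']) := by
  unfold rhs
  rw [range'_cons i cs.length hi]
  simp only [List.find?_cons, hc]
  cases hf : (List.range' (i + 1) (cs.length - (i + 1))).find? (fun j => (4 ≤ j) && rxFindP cs j) with
  | none =>
    simp only [List.filter_cons, hd, Bool.not_false, if_pos, List.map_cons]
    rw [List.append_cons]
  | some p =>
    have hp : i + 1 ≤ p := by
      have := List.mem_range'_1.mp (List.mem_of_find?_eq_some hf)
      omega
    simp only []
    rw [range'_cons i p (by omega)]
    simp only [List.filter_cons, hd, Bool.not_false, if_pos, List.map_cons]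
    rw [List.append_cons]

-- buffer invariant: A's buffer equals the 4-wide window of the original stream
lemma loop_eq (cs : List Char) :
    ∀ (k i : Nat) (tx : List Char), k = cs.length - i → i ≤ cs.length →
      rxLoop (cs.drop i) ((cs.take i).drop (i - 4)) tx = rhs cs i tx := by
  intro k
  induction k with
  | zero =>
    intro i tx hk hle
    have hin : i = cs.length := by omega
    subst hin
    simp [rxLoop, rhs, List.drop_length]
  | succ k ih =>
    intro i tx hk hle
    have hi : i < cs.length := by omega
    have hdrop : cs.drop i = cs[i] :: cs.drop (i + 1) := List.drop_eq_getElem_cons hi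
    have hget? : cs[i]? = some cs[i] := List.getElem?_eq_getElem hi
    have hgetD : cs.getD i ' ' = cs[i] := by
      rw [List.getD_eq_getElem?_getD, hget?, Option.getD_some]
    have htake : cs.take (i + 1) = cs.take i ++ [cs[i]] := by
      rw [List.take_succ, List.getElem?_eq_getElem hi]; rfl
    rw [hdrop]
    unfold rxLoop
    by_cases hwin : (cs.take i).drop (i - 4) = ['0', '1', '1', '1']
    · have hi4 : 4 ≤ i := by
        by_contra hlt
        have := congrArg List.length hwin
        simp [List.length_drop, List.length_take] at this
        omega
      have hwin' : (cs.drop (i - 4)).take 4 = ['0', '1', '1', '1'] := by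
        rw [List.drop_take] at hwin
        have h4 : i - (i - 4) = 4 := by omega
        rwa [h4] at hwin
      have hbuf1 : ((cs.take i).drop (i - 4)).drop 1 ++ [cs[i]] = (cs.take (i + 1)).drop (i + 1 - 4) := by
        rw [List.drop_drop, htake,
            List.drop_append_of_le_length (by simp [List.length_take]; omega)]
        congr 2
        omega
      by_cases hbit : cs[i] = '0'
      · -- branch 1: stuffed zero, skipped
        rw [if_pos ⟨hwin, hbit⟩, hbuf1]
        rw [ih (i + 1) tx (by omega) (by omega)]
        refine (rhs_skip cs i tx hi ?_ ?_).symm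
        · simp [rxFindP, hwin', hget?, hbit]
        · simp [rxDropP, hwin', hget?, hbit, hi4]
      · -- branch 2: flag detected, return txstream[:-4]
        rw [if_neg (by tauto), if_pos hwin]
        refine (rhs_stop cs i tx hi ?_).symm
        simp [rxFindP, hwin', hget?, hbit, hi4]
    · have hcF : ((4 ≤ i) && rxFindP cs i) = false := by
        rcases Nat.lt_or_ge i 4 with h4 | h4
        · simp [show ¬ (4 ≤ i) by omega]
        · have : ¬ (cs.drop (i - 4)).take 4 = ['0', '1', '1', '1'] := by
            intro h
            apply hwin
            rw [List.drop_take]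
            have h4' : i - (i - 4) = 4 := by omega
            rw [h4', h]
          simp [rxFindP, this]
      have hdF : rxDropP cs i = false := by
        rcases Nat.lt_or_ge i 4 with h4 | h4
        · simp [rxDropP, show ¬ (4 ≤ i) by omega]
        · have : ¬ (cs.drop (i - 4)).take 4 = ['0', '1', '1', '1'] := by
            intro h
            apply hwin
            rw [List.drop_take]
            have h4' : i - (i - 4) = 4 := by omega
            rw [h4', h]
          simp [rxDropP, this]
      rw [if_neg (by tauto), if_neg hwin]
      have hlen : ((cs.take i).drop (i - 4)).length = i - (i - 4) := by
        simp [List.length_drop, List.length_take]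
        omega
      by_cases h4 : i < 4
      · -- branch 3: buffer still growing
        rw [if_pos (by rw [hlen]; omega)]
        have hbuf : (cs.take i).drop (i - 4) ++ [cs[i]] = (cs.take (i + 1)).drop (i + 1 - 4) := by
          have e1 : i - 4 = 0 := by omega
          have e2 : i + 1 - 4 = 0 := by omega
          rw [e1, e2, List.drop_zero, List.drop_zero, htake]
        rw [hbuf, ih (i + 1) (tx ++ [cs[i]]) (by omega) (by omega)]
        rw [← hgetD]
        exact (rhs_keep cs i tx hi hcF hdF).symm
      · -- branch 4: buffer slides
        rw [if_neg (by rw [hlen]; omega)]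
        have hbuf1 : ((cs.take i).drop (i - 4)).drop 1 ++ [cs[i]] = (cs.take (i + 1)).drop (i + 1 - 4) := by
          rw [List.drop_drop, htake,
              List.drop_append_of_le_length (by simp [List.length_take]; omega)]
          congr 2
          omega
        rw [hbuf1, ih (i + 1) (tx ++ [cs[i]]) (by omega) (by omega)]
        rw [← hgetD]
        exact (rhs_keep cs i tx hi hcF hdF).symm

lemma find?_ext_ge (cs : List Char) :
    ∀ (k s : Nat), 4 ≤ s →
      (List.range' s k).find? (rxFindP cs) =
        (List.range' s k).find? (fun j => (4 ≤ j) && rxFindP cs j) := by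
  intro k
  induction k with
  | zero => intro s _; rfl
  | succ k ih =>
    intro s hs
    rw [List.range'_succ]
    simp only [List.find?_cons, decide_eq_true hs, Bool.true_and]
    cases rxFindP cs s with
    | true => rfl
    | false => exact ih (s + 1) (by omega)

lemma find?_shift (cs : List Char) :
    (List.range' 4 (cs.length - 4)).find? (rxFindP cs) =
      (List.range' 0 cs.length).find? (fun j => (4 ≤ j) && rxFindP cs j) := by
  rcases Nat.lt_or_ge cs.length 4 with h | h
  · have h0 : cs.length - 4 = 0 := by omega
    rw [h0]
    symm
    rw [List.range'_zero, List.find?_nil, List.find?_eq_none]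
    intro x hx
    have := List.mem_range'_1.mp hx
    simp [show ¬ (4 ≤ x) by omega]
  · have hsplit : List.range' 0 cs.length = List.range' 0 4 ++ List.range' 4 (cs.length - 4) := by
      rw [List.range'_append_1]
      congr 1
      omega
    rw [hsplit, List.find?_append]
    have hnone : (List.range' 0 4).find? (fun j => (4 ≤ j) && rxFindP cs j) = none := by
      rw [List.find?_eq_none]
      intro x hx
      have := List.mem_range'_1.mp hx
      simp [show ¬ (4 ≤ x) by omega]
    rw [hnone, Option.none_or]
    exact find?_ext_ge cs (cs.length - 4) 4 (by omega)

-- ===== VERDICT (by name: the statement is the Claim_ definition above) =====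
theorem rx_spec : Claim_equal_rx := by
  intro s _
  unfold Spec_rx rx rx_alt
  have h0 := loop_eq s.toList (s.toList.length) 0 [] (by omega) (Nat.zero_le _)
  simp only [List.drop_zero, List.take_zero, Nat.zero_sub, List.drop_nil] at h0
  rw [h0]
  unfold rhs
  simp only [Nat.sub_zero, List.range_eq_range']
  rw [← find?_shift s.toList]
  cases hf : (List.range' 4 (s.toList.length - 4)).find? (rxFindP s.toList) with
  | none => simp
  | some p => simp
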